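-- pv_equiv track=rewrite | github.com/tnc0/Python-Calculator | Problems/Exams/exam1.py | tirnak
-- ===== SOURCE A (Python) =====
-- def tirnak(kelimem = "adad", cumle = "adad dad abc"):
--     yenicumle = ""
--     kelime = ""
--     for harf in cumle + " ":
--         if(harf != " "):
--              kelime+= harf
--         else:
--             if(kelime == kelimem):
--                 yenicumle += f'"{kelime}"'
--                 kelime = ""
--             if(kelime != kelimem):
--                 yenicumle += kelime + " "
--                 kelime = ""
--     return yenicumle
-- ===== SOURCE B (Python) =====
-- def tirnak(kelimem = "adad", cumle = "adad dad abc"):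
--     return "".join(
--         f'"{tok}" ' if tok == kelimem else tok + " "
--         for tok in cumle.split(" ")
--     )
-- ===== Notes on version B (the rewrite author's own statement) =====
-- stated objective: simpler
-- what changed: Replaces the char-by-char accumulate/flush state machine with a one-line tokenize-and-join: split the sentence on single spaces and map each token to its output piece.
-- intended difference: When kelimem is the empty string and the sentence splits on single spaces into a token list containing an empty token, A's double-if flush drops the trailing space after each quoted empty token, while B uniformly appends one space after every quoted token, which is the intended uniform formatting. — e.g. on tirnak("", ""): A returns "\"\"", B returns "\"\" "
import Mathlib
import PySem

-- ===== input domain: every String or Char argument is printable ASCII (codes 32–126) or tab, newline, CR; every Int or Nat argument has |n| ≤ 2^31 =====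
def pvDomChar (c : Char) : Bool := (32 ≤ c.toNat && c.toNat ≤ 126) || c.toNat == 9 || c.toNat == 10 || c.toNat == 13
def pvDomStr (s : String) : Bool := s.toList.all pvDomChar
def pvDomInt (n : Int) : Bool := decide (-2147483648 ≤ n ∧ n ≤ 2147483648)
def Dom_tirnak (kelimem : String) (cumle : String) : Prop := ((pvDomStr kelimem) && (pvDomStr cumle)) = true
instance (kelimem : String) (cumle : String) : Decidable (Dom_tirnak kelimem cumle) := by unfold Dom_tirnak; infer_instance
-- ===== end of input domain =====

-- B replaces A's char-by-char accumulate/flush state machine with a one-line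
-- tokenize-and-join (split on single spaces, map each token to its piece); objective:
-- simpler. Intended difference D_: for the empty search word on sentences with an
-- empty token, A drops the space after the quoted empty token; B spaces uniformly.


-- ===== PORT A =====
-- one step of A's loop body; state = (yenicumle, kelime), strings as List Char
def tirnakStep (kelimem : List Char) (st : List Char × List Char) (harf : Char) :
    List Char × List Char :=
  if harf ≠ ' ' then (st.1, st.2 ++ [harf])
  else
    -- if kelime == kelimem: yenicumle += f'"{kelime}"'; kelime = ""
    let st1 := if st.2 = kelimem then (st.1 ++ '"' :: st.2 ++ ['"'], ([] : List Char)) else st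
    -- if kelime != kelimem: yenicumle += kelime + " "; kelime = ""
    if st1.2 ≠ kelimem then (st1.1 ++ st1.2 ++ [' '], ([] : List Char)) else st1

def tirnak (kelimem : String) (cumle : String) : String :=
  String.ofList ((cumle.toList ++ [' ']).foldl (tirnakStep kelimem.toList) ([], [])).1

-- ===== PORT B =====
-- one token's output piece (Source B's generator-expression body)
def tirnakPiece (kelimem : List Char) (tok : List Char) : List Char :=
  if tok = kelimem then '"' :: tok ++ ['"', ' '] else tok ++ [' ']

def tirnak_alt (kelimem : String) (cumle : String) : String :=
  String.ofList (PySem.Chars.join []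
    ((PySem.Chars.splitOn cumle.toList [' ']).map (tirnakPiece kelimem.toList)))

-- ===== PRECONDITION & SPEC =====
-- When kelimem is the empty string and the sentence splits (on " ") into a token list
-- containing an empty token, A drops the space after the quoted empty token (its second
-- flush-if never fires there), while B appends one space after every quoted token,
-- which is the intended uniform formatting.
def D_tirnak (kelimem : String) (cumle : String) : Prop :=
  kelimem = "" ∧ [] ∈ PySem.Chars.splitOn cumle.toList [' ']
instance (kelimem : String) (cumle : String) : Decidable (D_tirnak kelimem cumle) := by
  unfold D_tirnak; infer_instance

def Spec_tirnak (kelimem : String) (cumle : String) (out : String) : Prop :=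
  ¬ D_tirnak kelimem cumle → out = tirnak_alt kelimem cumle
instance (kelimem : String) (cumle : String) (out : String) : Decidable (Spec_tirnak kelimem cumle out) := by unfold Spec_tirnak; infer_instance

def pvDiffWitness_tirnak : String × String := ("", "")
def pvDiffWitnessOut_tirnak : String × String := ("\"\"", "\"\" ")

-- ===== CLAIM (what is proved, stated in full; the proofs are below) =====
def Claim_unchanged_tirnak : Prop := ∀ (kelimem : String) (cumle : String), Dom_tirnak kelimem cumle → Spec_tirnak kelimem cumle (tirnak kelimem cumle)
def Claim_changed_tirnak : Prop := Dom_tirnak (pvDiffWitness_tirnak.1) (pvDiffWitness_tirnak.2) ∧ D_tirnak (pvDiffWitness_tirnak.1) (pvDiffWitness_tirnak.2) ∧ tirnak (pvDiffWitness_tirnak.1) (pvDiffWitness_tirnak.2) = pvDiffWitnessOut_tirnak.1 ∧ tirnak_alt (pvDiffWitness_tirnak.1) (pvDiffWitness_tirnak.2) = pvDiffWitnessOut_tirnak.2 ∧ pvDiffWitnessOut_tirnak.1 ≠ pvDiffWitnessOut_tirnak.2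
def Claim_exact_tirnak : Prop := ∀ (kelimem : String) (cumle : String), Dom_tirnak kelimem cumle → D_tirnak kelimem cumle → tirnak kelimem cumle ≠ tirnak_alt kelimem cumle

-- ===== LEMMAS AND PROOFS =====

-- the piece A's flush emits for an accumulated word (space dropped iff kelimem = [] matched)
def tirnakPieceA (kelimem : List Char) (tok : List Char) : List Char :=
  if tok = kelimem then '"' :: tok ++ ['"'] ++ (if kelimem = [] then [] else [' '])
  else tok ++ [' ']

-- structural reference splitter: tokens of l by single spaces, cur = chars read so far
def tokSplit : List Char → List Char → List (List Char)
  | [], cur => [cur]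
  | c :: l, cur => if c = ' ' then cur :: tokSplit l [] else tokSplit l (cur ++ [c])

-- join with the empty separator is concatenation, one token at a time
theorem join_nil_cons (x : List Char) (xs : List (List Char)) :
    PySem.Chars.join [] (x :: xs) = x ++ PySem.Chars.join [] xs := by
  cases xs with
  | nil => simp [PySem.Chars.join_singleton, PySem.Chars.join_nil]
  | cons q rest => simp [PySem.Chars.join_cons_cons]

theorem go_eq_tokSplit (fuel : Nat) (l cur : List Char) (acc : List (List Char))
    (h : l.length < fuel) :
    PySem.Chars.splitOn.go [' '] fuel l cur acc = acc.reverse ++ tokSplit l cur.reverse := by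
  induction fuel generalizing l cur acc with
  | zero => omega
  | succ n ih =>
    cases l with
    | nil => rw [PySem.Chars.splitOn.go.eq_def]; simp [tokSplit]
    | cons c rest =>
      rw [PySem.Chars.splitOn.go.eq_def]
      simp only [List.isPrefixOf, List.length] at *
      by_cases hc : c = ' '
      · simp [hc, ih rest [] _ (by omega), tokSplit]
      · have hb : (' ' == c) = false := by simp [Ne.symm hc]
        simp [hb, hc, ih rest (c :: cur) acc (by omega), tokSplit]

theorem splitOn_eq_tokSplit (l : List Char) :
    PySem.Chars.splitOn l [' '] = tokSplit l [] := by
  unfold PySem.Chars.splitOn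
  rw [go_eq_tokSplit (l.length + 1) l [] [] (by omega)]
  simp

-- the flush at a space turns the accumulated word into exactly its A-piece
theorem step_space (kelimem : List Char) (yeni kel : List Char) :
    tirnakStep kelimem (yeni, kel) ' ' = (yeni ++ tirnakPieceA kelimem kel, []) := by
  simp only [tirnakStep, tirnakPieceA, if_neg (by simp : ¬ (' ' ≠ ' '))]
  by_cases h : kel = kelimem
  · by_cases hk : kelimem = ([] : List Char) <;> simp [h, hk]
  · simp [h]

-- a non-space char is simply accumulated
theorem step_nonspace (kelimem : List Char) (yeni kel : List Char) (c : Char) (hc : c ≠ ' ') :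
    tirnakStep kelimem (yeni, kel) c = (yeni, kel ++ [c]) := by
  simp [tirnakStep, hc]

-- main invariant: A's fold over l ++ [' '] from (yeni, cur) emits yeni then the A-pieces
theorem foldl_eq_pieces (kelimem : List Char) (l : List Char) :
    ∀ (yeni cur : List Char),
      ((l ++ [' ']).foldl (tirnakStep kelimem) (yeni, cur)).1
        = yeni ++ PySem.Chars.join [] ((tokSplit l cur).map (tirnakPieceA kelimem)) := by
  induction l with
  | nil =>
    intro yeni cur
    simp [tokSplit, step_space]
  | cons c l ih =>
    intro yeni cur
    by_cases hc : c = ' '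
    · subst hc
      rw [List.cons_append, List.foldl_cons, step_space, ih]
      simp [tokSplit, join_nil_cons]
    · rw [List.cons_append, List.foldl_cons, step_nonspace kelimem yeni cur c hc, ih]
      simp [tokSplit, hc]

-- A-pieces and B-pieces coincide unless kelimem = [] and the token is []
theorem pieceA_eq_pieceB (kelimem tok : List Char)
    (h : kelimem ≠ [] ∨ tok ≠ []) : tirnakPieceA kelimem tok = tirnakPiece kelimem tok := by
  unfold tirnakPieceA tirnakPiece
  by_cases ht : tok = kelimem
  · subst ht
    have hk : tok ≠ [] := by rcases h with h | h <;> exact h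
    simp [hk]
  · simp [ht]

theorem join_nil_length (L : List (List Char)) :
    (PySem.Chars.join [] L).length = (L.map List.length).sum := by
  induction L with
  | nil => simp [PySem.Chars.join_nil]
  | cons x xs ih => rw [join_nil_cons]; simp [ih]

theorem piecelen_le (u : List Char) :
    (tirnakPieceA ([] : List Char) u).length ≤ (tirnakPiece ([] : List Char) u).length := by
  unfold tirnakPieceA tirnakPiece
  by_cases hu : u = ([] : List Char) <;> simp [hu]

theorem sum_pieces_le (ts : List (List Char)) :
    ((ts.map (tirnakPieceA [])).map List.length).sum
      ≤ ((ts.map (tirnakPiece [])).map List.length).sum := by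
  induction ts with
  | nil => simp
  | cons u us ihu => simpa using Nat.add_le_add (piecelen_le u) ihu

-- with kelimem = [], the B-pieces are strictly longer in total once some token is empty
theorem sum_pieces_lt (toks : List (List Char)) (hmem : [] ∈ toks) :
    ((toks.map (tirnakPieceA [])).map List.length).sum
      < ((toks.map (tirnakPiece [])).map List.length).sum := by
  induction toks with
  | nil => cases hmem
  | cons t ts ih =>
    have hles := sum_pieces_le ts
    rcases List.mem_cons.mp hmem with h | h
    · have ht : t = ([] : List Char) := h.symm
      subst ht
      simp only [List.map_cons, List.sum_cons]
      have : (tirnakPieceA ([] : List Char) []).length < (tirnakPiece ([] : List Char) []).length := by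
        simp [tirnakPieceA, tirnakPiece]
      omega
    · have h1 := ih h
      simp only [List.map_cons, List.sum_cons]
      have h2 := piecelen_le t
      omega

-- ===== VERDICT (by name: the statement is the Claim_ definition above) =====
theorem tirnak_spec : Claim_unchanged_tirnak := by
  intro kelimem cumle _ hnd
  unfold tirnak tirnak_alt
  rw [splitOn_eq_tokSplit, foldl_eq_pieces]
  simp only [List.nil_append]
  congr 2
  apply List.map_congr_left
  intro tok htok
  apply pieceA_eq_pieceB
  by_cases hk : kelimem.toList = []
  · right
    intro htnil
    apply hnd
    refine ⟨?_, ?_⟩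
    · rw [← String.ofList_toList (s := kelimem), hk]
    · rw [splitOn_eq_tokSplit]; exact htnil ▸ htok
  · left; exact hk

theorem tirnak_changed : Claim_changed_tirnak := by
  unfold Claim_changed_tirnak; decide

theorem tirnak_tight : Claim_exact_tirnak := by
  intro kelimem cumle _ hd heq
  obtain ⟨hk, hmem⟩ := hd
  have hkl : kelimem.toList = ([] : List Char) := by simp [hk]
  have hlen := congrArg (fun s : String => s.toList.length) heq
  simp only [tirnak, tirnak_alt, String.toList_ofList] at hlen
  rw [foldl_eq_pieces, splitOn_eq_tokSplit, hkl] at hlen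
  rw [splitOn_eq_tokSplit] at hmem
  simp only [List.nil_append, join_nil_length, List.map_map] at hlen
  have := sum_pieces_lt (tokSplit cumle.toList []) hmem
  simp only [List.map_map] at this
  omega
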